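-- pv_equiv track=rewrite | github.com/NazarioJL/advent_of_code | advent_of_code/solutions/year2022/day_08.py | get_visible
-- ===== SOURCE A (Python) =====
-- from typing import Iterable
--
-- Grid = list[list[int]]
--
-- Coord = tuple[int, int]
--
-- def get_visible(grid: Grid, coords: Iterable[Coord]) -> Iterable[Coord]:
--     prev: int | None = None
--     for r, c in coords:
--         curr = grid[r][c]
--         if prev is None:
--             prev = curr
--             yield r, c
--         else:
--             if curr > prev:
--                 prev = curr
--                 yield r, c
-- ===== SOURCE B (Python) =====
-- def get_visible(grid, coords):
--     # Two-pass: build the running (prefix) maximum table, then keep the coords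
--     # where the prefix max strictly increases (first position always kept).
--     coords = list(coords)
--     prefix = []
--     m = None
--     for r, c in coords:
--         h = grid[r][c]
--         m = h if m is None or h > m else m
--         prefix.append(m)
--     return [rc for rc, m, pm in zip(coords, prefix, [None] + prefix) if pm is None or m > pm]
-- ===== Notes on version B (the rewrite author's own statement) =====
-- stated objective: alternative
-- what changed: Replaces A's single interleaved update-and-yield generator loop with a two-pass decomposition: first build the prefix-maximum table, then select coords where that table strictly increases (first always); A is a lazy generator while B returns a list, return values are equal as sequences. Pre_ excludes coords that index outside the grid, where A raises IndexError.
import Mathlib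
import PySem

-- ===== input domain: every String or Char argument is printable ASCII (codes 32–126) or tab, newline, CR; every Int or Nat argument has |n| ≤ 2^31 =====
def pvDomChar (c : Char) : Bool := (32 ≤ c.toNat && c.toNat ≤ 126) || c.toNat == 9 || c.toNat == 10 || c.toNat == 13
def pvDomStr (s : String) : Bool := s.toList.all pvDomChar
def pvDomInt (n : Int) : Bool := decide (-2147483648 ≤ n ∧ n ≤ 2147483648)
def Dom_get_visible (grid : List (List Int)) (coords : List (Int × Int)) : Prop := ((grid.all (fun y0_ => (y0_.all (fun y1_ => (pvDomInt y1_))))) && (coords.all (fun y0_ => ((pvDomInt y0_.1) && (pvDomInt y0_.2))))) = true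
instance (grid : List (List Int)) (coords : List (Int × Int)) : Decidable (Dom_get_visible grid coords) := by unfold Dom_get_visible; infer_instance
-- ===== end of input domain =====

-- B does the same selection by a two-pass decomposition (prefix-max table, then strict-increase filter)
-- instead of A's single interleaved update-and-yield loop; A is a generator, compared as the list of its yields.

-- ===== PORT A =====
-- A's generator loop: carry prev : Option Int, yield on first coord or strict increase.
def pvGoA (grid : List (List Int)) (prev : Option Int) : List (Int × Int) → List (Int × Int)
  | [] => []
  | (r, c) :: rest =>
    match (PySem.List.pyGet? grid r).bind (fun row => PySem.List.pyGet? row c) with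
    | none => []   -- IndexError in Python; excluded by Pre_get_visible
    | some curr =>
      match prev with
      | none => (r, c) :: pvGoA grid (some curr) rest
      | some p =>
        if curr > p then (r, c) :: pvGoA grid (some curr) rest
        else pvGoA grid prev rest

def get_visible (grid : List (List Int)) (coords : List (Int × Int)) : List (Int × Int) :=
  pvGoA grid none coords

-- ===== PORT B =====
-- pass 1 of Source B: the prefix-maximum table (none = an IndexError happened).
def pvPrefB (grid : List (List Int)) (m : Option Int) : List (Int × Int) → Option (List Int)
  | [] => some []
  | (r, c) :: rest =>
    match (PySem.List.pyGet? grid r).bind (fun row => PySem.List.pyGet? row c) with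
    | none => none
    | some h =>
      let m' : Int := match m with | none => h | some p => if h > p then h else p
      (pvPrefB grid (some m') rest).map (fun t => m' :: t)

-- pass 2 of Source B: zip(coords, prefix, [None] + prefix) and keep where pm is None or m > pm.
def get_visible_alt (grid : List (List Int)) (coords : List (Int × Int)) : List (Int × Int) :=
  match pvPrefB grid none coords with
  | none => []
  | some pref =>
    ((coords.zip (pref.zip ((none : Option Int) :: pref.map some))).filter
      (fun t => match t.2.2 with | none => true | some pm => decide (t.2.1 > pm))).map (fun t => t.1)

-- ===== PRECONDITION & SPEC =====
-- Pre_ excludes exactly the coords that index outside the grid (Python raises IndexError there).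
def Pre_get_visible (grid : List (List Int)) (coords : List (Int × Int)) : Prop :=
  (coords.all (fun rc =>
    ((PySem.List.pyGet? grid rc.1).bind (fun row => PySem.List.pyGet? row rc.2)).isSome)) = true
instance (grid : List (List Int)) (coords : List (Int × Int)) : Decidable (Pre_get_visible grid coords) := by unfold Pre_get_visible; infer_instance

def pvWitness_get_visible : List (List Int) × (List (Int × Int)) :=
  ([[1, 2], [3, 0]], [(0, 0), (1, 1), (0, 1), (-1, 0)])

def Spec_get_visible (grid : List (List Int)) (coords : List (Int × Int)) (out : List (Int × Int)) : Prop := out = get_visible_alt grid coords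
instance (grid : List (List Int)) (coords : List (Int × Int)) (out : List (Int × Int)) : Decidable (Spec_get_visible grid coords out) := by unfold Spec_get_visible; infer_instance

-- ===== CLAIM (what is proved, stated in full; the proofs are below) =====
def Claim_equal_get_visible : Prop := ∀ (grid : List (List Int)) (coords : List (Int × Int)), Dom_get_visible grid coords → Pre_get_visible grid coords → Spec_get_visible grid coords (get_visible grid coords)

-- ===== LEMMAS AND PROOFS =====

-- Main invariant: if the prefix-max table for suffix `coords` starting from running max `m`
-- is `pref`, then A's loop from `prev = m` yields exactly B's selection with `m` as the
-- "previous prefix value" shifted in front of `pref`.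
lemma pvGoA_eq_sel (grid : List (List Int)) :
    ∀ (coords : List (Int × Int)) (m : Option Int) (pref : List Int),
      pvPrefB grid m coords = some pref →
      pvGoA grid m coords =
        ((coords.zip (pref.zip (m :: pref.map some))).filter
          (fun t => match t.2.2 with | none => true | some pm => decide (t.2.1 > pm))).map
          (fun t => t.1) := by
  intro coords
  induction coords with
  | nil =>
    intro m pref h
    simp [pvPrefB] at h
    subst h
    simp [pvGoA]
  | cons rc rest ih =>
    intro m pref h
    obtain ⟨r, c⟩ := rc
    simp only [pvPrefB] at h
    cases hl : (PySem.List.pyGet? grid r).bind (fun row => PySem.List.pyGet? row c) with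
    | none => rw [hl] at h; simp at h
    | some curr =>
      rw [hl] at h
      simp only [Option.map_eq_some_iff] at h
      obtain ⟨pref', hrest, hpref⟩ := h
      subst hpref
      cases m with
      | none =>
        have hr : pvPrefB grid (some curr) rest = some pref' := hrest
        simp only [pvGoA, hl, List.zip_cons_cons, List.filter_cons, List.map_cons]
        rw [ih (some curr) pref' hr]
        simp
      | some p =>
        have hr : pvPrefB grid (some (if curr > p then curr else p)) rest = some pref' := hrest
        by_cases hc : curr > p
        · rw [if_pos hc] at hr
          simp only [pvGoA, hl, if_pos hc, List.zip_cons_cons, List.filter_cons,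
            List.map_cons]
          rw [ih (some curr) pref' hr]
          simp [hc]
        · rw [if_neg hc] at hr
          simp only [pvGoA, hl, if_neg hc, List.zip_cons_cons, List.filter_cons]
          rw [ih (some p) pref' hr]
          simp [hc]

-- Under Pre_, pass 1 never hits an IndexError.
lemma pvPrefB_isSome (grid : List (List Int)) :
    ∀ (coords : List (Int × Int)) (m : Option Int),
      Pre_get_visible grid coords → (pvPrefB grid m coords).isSome := by
  intro coords
  induction coords with
  | nil => intro m _; simp [pvPrefB]
  | cons rc rest ih =>
    intro m hpre
    obtain ⟨r, c⟩ := rc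
    unfold Pre_get_visible at hpre
    simp only [List.all_cons, Bool.and_eq_true] at hpre
    obtain ⟨h1, h2⟩ := hpre
    cases hl : (PySem.List.pyGet? grid r).bind (fun row => PySem.List.pyGet? row c) with
    | none => rw [hl] at h1; simp at h1
    | some curr =>
      simp only [pvPrefB, hl]
      have := ih (some (match m with | none => curr | some p => if curr > p then curr else p)) h2
      cases hp : pvPrefB grid _ rest with
      | none => rw [hp] at this; simp at this
      | some pref' => simp only [hp, Option.map_some, Option.isSome_some]

-- ===== VERDICT (by name: the statement is the Claim_ definition above) =====
theorem get_visible_spec : Claim_equal_get_visible := by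
  intro grid coords _ hpre
  unfold Spec_get_visible get_visible get_visible_alt
  have hs := pvPrefB_isSome grid coords none hpre
  cases hp : pvPrefB grid none coords with
  | none => rw [hp] at hs; simp at hs
  | some pref => exact pvGoA_eq_sel grid coords none pref hp
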